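-- pv_equiv track=rewrite | github.com/HansKristian-Work/rdoc-helper-utils | exporter/__init__.py | extract_string
-- ===== SOURCE A (Python) =====
-- def extract_string(tokenstr):
--     s = ''
--     for c in tokenstr:
--         for i in range(4):
--             shifted = (c >> (8 * i)) & 0xff
--             if shifted == 0:
--                 break
--             s += chr(shifted)
--     return s
-- ===== SOURCE B (Python) =====
-- def extract_string(tokenstr):
--     parts = []
--     for c in tokenstr:
--         buf = (c & 0xffffffff).to_bytes(4, 'little')
--         parts.append(buf.split(b'\x00', 1)[0].decode('latin-1'))
--     return ''.join(parts)
-- ===== Notes on version B (the rewrite author's own statement) =====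
-- stated objective: idiomatic
-- what changed: Replaces the per-index shift-and-break inner loop with building each token's 4 little-endian bytes at once, cutting at the first null byte, and joining per-token latin-1 decodes.
import Mathlib
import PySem

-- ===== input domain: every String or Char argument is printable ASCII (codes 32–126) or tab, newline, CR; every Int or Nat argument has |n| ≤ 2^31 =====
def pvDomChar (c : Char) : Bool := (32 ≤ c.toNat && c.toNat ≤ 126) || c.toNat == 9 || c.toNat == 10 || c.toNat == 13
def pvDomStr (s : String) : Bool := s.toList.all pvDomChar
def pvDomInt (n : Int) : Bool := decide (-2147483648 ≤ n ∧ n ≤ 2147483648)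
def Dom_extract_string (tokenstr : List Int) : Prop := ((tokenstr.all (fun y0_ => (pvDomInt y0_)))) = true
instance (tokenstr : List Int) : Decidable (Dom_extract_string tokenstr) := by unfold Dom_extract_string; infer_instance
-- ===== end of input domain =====

-- B replaces A's shift-and-break inner loop by a 4-byte little-endian buffer cut at its
-- first null byte (idiomatic; return value only, neither version mutates its argument).

-- ===== PORT A =====
-- inner 'for i in range(4): shifted = (c >> (8*i)) & 0xff; if shifted == 0: break; s += chr(shifted)'
-- (range(4) transliterated as the list [0, 1, 2, 3]; 'break' stops the recursion)
def extractBytesA (c : Int) : List Nat → String → String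
  | [], s => s
  | i :: rest, s =>
    let shifted := PySem.Int.band (c >>> (8 * i)) 255
    if shifted = 0 then s
    else extractBytesA c rest (s.push (Char.ofNat shifted.toNat))

def extract_string (tokenstr : List Int) : String :=
  tokenstr.foldl (fun s c => extractBytesA c [0, 1, 2, 3] s) ""

-- ===== PORT B =====
-- (c & 0xffffffff).to_bytes(4, 'little'), cut at the first null byte, decoded latin-1
def altToken (c : Int) : String :=
  let m := (PySem.Int.band c 4294967295).toNat
  let buf := [m % 256, m / 256 % 256, m / 65536 % 256, m / 16777216 % 256]
  String.ofList ((buf.takeWhile (fun b => b ≠ 0)).map Char.ofNat)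

def extract_string_alt (tokenstr : List Int) : String :=
  String.join (tokenstr.map altToken)

-- ===== PRECONDITION & SPEC =====
def Spec_extract_string (tokenstr : List Int) (out : String) : Prop := out = extract_string_alt tokenstr
instance (tokenstr : List Int) (out : String) : Decidable (Spec_extract_string tokenstr out) := by unfold Spec_extract_string; infer_instance

-- ===== CLAIM (what is proved, stated in full; the proofs are below) =====
def Claim_equal_extract_string : Prop := ∀ (tokenstr : List Int), Dom_extract_string tokenstr → Spec_extract_string tokenstr (extract_string tokenstr)

-- ===== LEMMAS AND PROOFS =====
lemma band255 (a : Int) : PySem.Int.band a 255 = a % 256 := by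
  unfold PySem.Int.band
  have h1 : a.toNat &&& 255 = a.toNat % 256 := Nat.and_two_pow_sub_one_eq_mod a.toNat 8
  have h2 : 255 &&& (-a - 1).toNat = (-a - 1).toNat % 256 :=
    Nat.and_comm _ _ ▸ Nat.and_two_pow_sub_one_eq_mod (-a - 1).toNat 8
  rw [if_pos (by norm_num : (0:Int) ≤ 255), show Int.toNat 255 = 255 from rfl]
  split <;> omega

lemma band32 (a : Int) : PySem.Int.band a 4294967295 = a % 4294967296 := by
  unfold PySem.Int.band
  have h1 : a.toNat &&& 4294967295 = a.toNat % 4294967296 := Nat.and_two_pow_sub_one_eq_mod a.toNat 32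
  have h2 : 4294967295 &&& (-a - 1).toNat = (-a - 1).toNat % 4294967296 :=
    Nat.and_comm _ _ ▸ Nat.and_two_pow_sub_one_eq_mod (-a - 1).toNat 32
  rw [if_pos (by norm_num : (0:Int) ≤ 4294967295), show Int.toNat 4294967295 = 4294967295 from rfl]
  split <;> omega

lemma byteA (c : Int) (k : Nat) (hk : k < 4) :
    PySem.Int.band (c >>> (8 * k)) 255 =
      (((PySem.Int.band c 4294967295).toNat / 2 ^ (8 * k) % 256 : Nat) : Int) := by
  rw [band255, band32]
  have hm : (((c % 4294967296).toNat : Int)) = c % 4294967296 :=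
    Int.toNat_of_nonneg (Int.emod_nonneg c (by norm_num))
  interval_cases k <;>
    · rw [Int.shiftRight_eq_div_pow]
      push_cast [Int.natCast_ediv]
      rw [hm]
      norm_num
      try omega

lemma push_eq (s : String) (ch : Char) : s.push ch = s ++ String.ofList [ch] := by
  have := String.append_singleton (s := s) (c := ch)
  simp [String.singleton] at this
  exact this.symm

def loopBytes : List Nat → String → String
  | [], s => s
  | b :: t, s => if b = 0 then s else loopBytes t (s.push (Char.ofNat b))

lemma gen (bs : List Nat) (s : String) :
    loopBytes bs s = s ++ String.ofList ((bs.takeWhile (fun b => b ≠ 0)).map Char.ofNat) := by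
  induction bs generalizing s with
  | nil => simp [loopBytes]
  | cons b t ih =>
    by_cases hb : b = 0
    · simp [loopBytes, hb]
    · rw [show (b :: t).takeWhile (fun b => b ≠ 0) = b :: t.takeWhile (fun b => b ≠ 0) by
        simp [List.takeWhile, hb]]
      rw [show String.ofList (List.map Char.ofNat (b :: t.takeWhile (fun b => b ≠ 0)))
            = String.ofList [Char.ofNat b] ++ String.ofList (List.map Char.ofNat (t.takeWhile (fun b => b ≠ 0))) by
        rw [← String.ofList_append]; rfl]
      rw [loopBytes, if_neg hb, ih, push_eq, String.append_assoc]

lemma token_eq (c : Int) (s : String) : extractBytesA c [0, 1, 2, 3] s = s ++ altToken c := by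
  have e0 := byteA c 0 (by norm_num)
  have e1 := byteA c 1 (by norm_num)
  have e2 := byteA c 2 (by norm_num)
  have e3 := byteA c 3 (by norm_num)
  simp only [extractBytesA]
  rw [e0, e1, e2, e3]
  simp only [Nat.cast_eq_zero, Int.toNat_natCast,
    show (8*0 : Nat) = 0 from rfl, show (8*1 : Nat) = 8 from rfl,
    show (8*2 : Nat) = 16 from rfl, show (8*3 : Nat) = 24 from rfl,
    show ((2:Nat)^0) = 1 from rfl, show ((2:Nat)^8) = 256 from rfl,
    show ((2:Nat)^16) = 65536 from rfl, show ((2:Nat)^24) = 16777216 from rfl,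
    Nat.div_one]
  rw [show s ++ altToken c
        = loopBytes [(PySem.Int.band c 4294967295).toNat % 256,
            (PySem.Int.band c 4294967295).toNat / 256 % 256,
            (PySem.Int.band c 4294967295).toNat / 65536 % 256,
            (PySem.Int.band c 4294967295).toNat / 16777216 % 256] s by rw [gen]; rfl]
  simp only [loopBytes]

lemma foldl_shift (l : List String) (a b : String) :
    l.foldl (· ++ ·) (a ++ b) = a ++ l.foldl (· ++ ·) b := by
  induction l generalizing b with
  | nil => simp
  | cons x t ih => simp only [List.foldl_cons, String.append_assoc, ih]

lemma join_cons (a : String) (l : List String) :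
    String.join (a :: l) = a ++ String.join l := by
  simp only [String.join, List.foldl_cons]
  rw [show ("" : String) ++ a = a ++ "" by simp, foldl_shift]

lemma foldl_eq (l : List Int) (s : String) :
    l.foldl (fun s c => extractBytesA c [0, 1, 2, 3] s) s = s ++ String.join (l.map altToken) := by
  induction l generalizing s with
  | nil => simp [String.join]
  | cons c t ih =>
    rw [List.foldl_cons, token_eq, ih, List.map_cons, join_cons, String.append_assoc]

-- ===== VERDICT (by name: the statement is the Claim_ definition above) =====
theorem extract_string_spec : Claim_equal_extract_string := by
  intro l _
  unfold Spec_extract_string extract_string extract_string_alt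
  simpa using foldl_eq l ""
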